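-- pv_equiv track=rewrite | github.com/jimmy-lt/kado | kado/utils/iterator.py | xlast
-- ===== SOURCE A (Python) =====
-- def xlast(iterable):
--     """Make an iterator that returns all elements from iterable except the
--     last one.
--
--
--     :param iterable: Iterable to get the elements from.
--     :type iterable: ~collections.abc.Iterable
--
--
--     :returns: An iterator where the last element from iterable is missing.
--     :rtype: ~collections.abc.Iterator
--
--     """
--     it = iter(iterable)
--
--     try:
--         current = next(it)
--     except StopIteration:
--         return
--
--     while True:
--         try:
--             follow = next(it)
--         except StopIteration:
--             break
--
--         yield current
--         current = follow
-- ===== SOURCE B (Python) =====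
-- def xlast(iterable):
--     data = list(iterable)
--     yield from data[:-1]
-- ===== Notes on version B (the rewrite author's own statement) =====
-- stated objective: simpler
-- what changed: Replaces the one-element lookahead buffer and paired next()/StopIteration handling with collect-into-a-list then yield the slice data[:-1].
import Mathlib
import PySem

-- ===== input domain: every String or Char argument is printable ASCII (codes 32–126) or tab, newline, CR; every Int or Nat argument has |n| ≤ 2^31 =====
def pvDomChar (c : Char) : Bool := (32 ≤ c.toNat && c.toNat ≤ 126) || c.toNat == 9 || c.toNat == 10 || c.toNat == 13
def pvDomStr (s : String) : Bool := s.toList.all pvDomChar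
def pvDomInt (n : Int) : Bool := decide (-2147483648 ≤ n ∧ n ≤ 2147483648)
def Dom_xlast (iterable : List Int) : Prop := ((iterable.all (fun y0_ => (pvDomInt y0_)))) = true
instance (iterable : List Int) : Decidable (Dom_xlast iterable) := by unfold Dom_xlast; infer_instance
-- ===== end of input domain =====

-- B collects the input and yields the slice without the last element; simpler than A's lookahead/StopIteration loop.


-- ===== PORT A =====
-- lookahead loop: 'current' is the buffered element, emit it when a follower exists
def xlastLoop (current : Int) : List Int → List Int
  | [] => []
  | follow :: rest => current :: xlastLoop follow rest

def xlast (iterable : List Int) : List Int :=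
  match iterable with
  | [] => []
  | current :: it => xlastLoop current it

-- ===== PORT B =====
def xlast_alt (iterable : List Int) : List Int :=
  PySem.List.slice iterable none (some (-1))

-- ===== PRECONDITION & SPEC =====
def Spec_xlast (iterable : List Int) (out : List Int) : Prop := out = xlast_alt iterable
instance (iterable : List Int) (out : List Int) : Decidable (Spec_xlast iterable out) := by unfold Spec_xlast; infer_instance

-- ===== CLAIM (what is proved, stated in full; the proofs are below) =====
def Claim_equal_xlast : Prop := ∀ (iterable : List Int), Dom_xlast iterable → Spec_xlast iterable (xlast iterable)

-- ===== LEMMAS AND PROOFS =====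

-- ===== VERDICT (by name: the statement is the Claim_ definition above) =====
theorem xlastLoop_eq_dropLast (c : Int) (l : List Int) :
    xlastLoop c l = (c :: l).dropLast := by
  induction l generalizing c with
  | nil => rfl
  | cons f rest ih => simp [xlastLoop, ih]

theorem xlast_spec : Claim_equal_xlast := by
  intro iterable _
  unfold Spec_xlast xlast xlast_alt
  rw [PySem.List.slice_to_neg_one]
  cases iterable with
  | nil => rfl
  | cons c it => exact xlastLoop_eq_dropLast c it
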